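-- pv_equiv track=rewrite | github.com/EslamElnajdy/alx-frontend-for-fun | markdown2html.py | convert_unordered_list
-- ===== SOURCE A (Python) =====
-- def convert_unordered_list(lines=''):
--     """ fn """
--     converted_list = []
--     in_list = False
--
--     for line in lines:
--         if line.startswith("- "):
--             if not in_list:
--                 converted_list.append("<ul>")
--                 in_list = True
--             converted_list.append(f"<li>{line.strip('- ').strip()}</li>")
--         else:
--             if in_list:
--                 converted_list.append("</ul>")
--                 in_list = False
--             converted_list.append(line)
--
--     if in_list:
--         converted_list.append("</ul>")
--
--     return converted_list
-- ===== SOURCE B (Python) =====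
-- def convert_unordered_list(lines=''):
--     """ fn """
--     out = []
--     i, n = 0, len(lines)
--     while i < n:
--         j = i
--         k = lines[i].startswith("- ")
--         while j < n and lines[j].startswith("- ") == k:
--             j += 1
--         if k:
--             out.append("<ul>")
--             out.extend(f"<li>{l.strip('- ').strip()}</li>" for l in lines[i:j])
--             out.append("</ul>")
--         else:
--             out.extend(lines[i:j])
--         i = j
--     return out
-- ===== Notes on version B (the rewrite author's own statement) =====
-- stated objective: alternative
-- what changed: Replaces A's in_list flag state machine with explicit segmentation of the input into maximal runs of '- '-prefixed vs other lines, emitting each run's HTML as a block.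
import Mathlib
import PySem

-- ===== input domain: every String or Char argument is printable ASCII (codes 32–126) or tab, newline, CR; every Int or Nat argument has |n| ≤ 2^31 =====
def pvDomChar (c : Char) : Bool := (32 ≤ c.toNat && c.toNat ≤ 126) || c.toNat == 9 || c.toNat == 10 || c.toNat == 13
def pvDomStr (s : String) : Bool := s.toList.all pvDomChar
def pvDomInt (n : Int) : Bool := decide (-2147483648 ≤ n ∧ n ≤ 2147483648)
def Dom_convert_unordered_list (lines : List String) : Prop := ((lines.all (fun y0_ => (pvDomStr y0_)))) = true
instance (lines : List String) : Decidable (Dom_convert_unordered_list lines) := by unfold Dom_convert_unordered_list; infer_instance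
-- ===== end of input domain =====

-- B replaces A's in_list flag state machine with explicit maximal-run segmentation; alternative decomposition, same cost. Return value only (neither mutates).

-- ===== PORT A =====
-- the for-loop of A: state = (accumulated output, in_list); the trailing flush is the [] case
def culA_loop : List String → List String → Bool → List String
  | [], acc, inl => if inl then acc ++ ["</ul>"] else acc
  | line :: rest, acc, inl =>
    if PySem.Str.startswith line "- " then
      culA_loop rest ((if inl then acc else acc ++ ["<ul>"]) ++
        ["<li>" ++ PySem.Str.strip (PySem.Str.stripChars line "- ") ++ "</li>"]) true
    else
      culA_loop rest ((if inl then acc ++ ["</ul>"] else acc) ++ [line]) false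

def convert_unordered_list (lines : List String) : List String :=
  culA_loop lines [] false

-- ===== PORT B =====
def cul_key (l : String) : Bool := PySem.Str.startswith l "- "
def cul_item (l : String) : String := "<li>" ++ PySem.Str.strip (PySem.Str.stripChars l "- ") ++ "</li>"

-- the outer while loop of Source B: peel off one maximal run (the inner while = takeWhile) per step
def convert_unordered_list_alt (lines : List String) : List String :=
  match lines with
  | [] => []
  | l :: rest =>
    let k := cul_key l
    let run := (l :: rest).takeWhile (fun x => cul_key x == k)
    let rest' := (l :: rest).dropWhile (fun x => cul_key x == k)
    (if k then "<ul>" :: run.map cul_item ++ ["</ul>"] else run) ++ convert_unordered_list_alt rest'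
  termination_by lines.length
  decreasing_by
    simp only [List.dropWhile_cons, beq_self_eq_true, if_pos]
    exact Nat.lt_succ_of_le (List.length_dropWhile_le _ _)

-- ===== PRECONDITION & SPEC =====
def Spec_convert_unordered_list (lines : List String) (out : List String) : Prop := out = convert_unordered_list_alt lines
instance (lines : List String) (out : List String) : Decidable (Spec_convert_unordered_list lines out) := by unfold Spec_convert_unordered_list; infer_instance

-- ===== CLAIM (what is proved, stated in full; the proofs are below) =====
def Claim_equal_convert_unordered_list : Prop := ∀ (lines : List String), Dom_convert_unordered_list lines → Spec_convert_unordered_list lines (convert_unordered_list lines)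

-- ===== LEMMAS AND PROOFS =====

-- accumulator lemma
theorem culA_loop_acc (ls : List String) (acc : List String) (inl : Bool) :
    culA_loop ls acc inl = acc ++ culA_loop ls [] inl := by
  induction ls generalizing acc inl with
  | nil => cases inl <;> simp [culA_loop]
  | cons l rest ih =>
    simp only [culA_loop]
    split_ifs <;> (rw [ih]; conv_rhs => rw [ih]) <;> simp

-- a run of non-keyed lines passes through unchanged, state stays false
theorem culA_loop_falseRun (run rest : List String)
    (h : ∀ x ∈ run, cul_key x = false) :
    culA_loop (run ++ rest) [] false = run ++ culA_loop rest [] false := by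
  induction run with
  | nil => simp
  | cons l r ih =>
    have hl : PySem.Str.startswith l "- " = false := h l List.mem_cons_self
    rw [List.cons_append]
    simp only [culA_loop]
    rw [if_neg (by rw [hl]; simp), culA_loop_acc,
      ih (fun x hx => h x (List.mem_cons_of_mem _ hx))]
    simp

-- inside a list, keyed lines become items, state stays true
theorem culA_loop_trueRun (run rest : List String)
    (h : ∀ x ∈ run, cul_key x = true) :
    culA_loop (run ++ rest) [] true = run.map cul_item ++ culA_loop rest [] true := by
  induction run with
  | nil => simp
  | cons l r ih =>
    have hl : PySem.Str.startswith l "- " = true := h l List.mem_cons_self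
    rw [List.cons_append]
    simp only [culA_loop]
    rw [if_pos hl, culA_loop_acc,
      ih (fun x hx => h x (List.mem_cons_of_mem _ hx))]
    simp [cul_item]

-- exiting a list: if the next line (if any) is not keyed, flush "</ul>" and continue in state false
theorem culA_loop_exit (rest : List String)
    (h : rest = [] ∨ ∃ x t, rest = x :: t ∧ cul_key x = false) :
    culA_loop rest [] true = "</ul>" :: culA_loop rest [] false := by
  rcases h with h | ⟨x, t, rfl, hx⟩
  · subst h; simp [culA_loop]
  · have hx' : PySem.Str.startswith x "- " = false := hx
    simp only [culA_loop]
    rw [if_neg (by rw [hx']; simp)]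
    rw [culA_loop_acc]
    conv_rhs => rw [culA_loop_acc]
    have hx2 : PySem.Chars.startswith x.toList ['-', ' '] = false := by simpa using hx'
    simp [hx2, culA_loop_acc t [x]]

-- the head of a dropWhile residue falsifies the predicate
theorem dropWhile_cons_false {p : String → Bool} :
    ∀ (L : List String) (x : String) (t : List String), L.dropWhile p = x :: t → p x = false := by
  intro L
  induction L with
  | nil => intro x t h; simp at h
  | cons a r ih =>
    intro x t h
    by_cases ha : p a = true
    · rw [List.dropWhile_cons_of_pos ha] at h; exact ih x t h
    · rw [List.dropWhile_cons_of_neg ha] at h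
      cases h; simpa using ha

theorem culA_eq_alt (n : Nat) : ∀ (ls : List String), ls.length ≤ n →
    culA_loop ls [] false = convert_unordered_list_alt ls := by
  induction n with
  | zero =>
    intro ls h
    have : ls = [] := List.length_eq_zero_iff.mp (Nat.le_zero.mp h)
    subst this; simp [culA_loop, convert_unordered_list_alt]
  | succ n ih =>
    intro ls hlen
    match ls with
    | [] => simp [culA_loop, convert_unordered_list_alt]
    | l :: rest =>
      rw [convert_unordered_list_alt]
      set p := fun x => cul_key x == cul_key l with hp
      have hpl : p l = true := by simp [hp]
      have hsplit : (l :: rest).takeWhile p ++ (l :: rest).dropWhile p = l :: rest :=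
        List.takeWhile_append_dropWhile
      have hrunmem : ∀ x ∈ (l :: rest).takeWhile p, cul_key x = cul_key l := by
        intro x hx
        have := List.mem_takeWhile_imp hx
        simpa [hp] using this
      have hdropcons : (l :: rest).dropWhile p = rest.dropWhile p := by
        simp [hpl]
      have hdlen : ((l :: rest).dropWhile p).length ≤ n := by
        rw [hdropcons]
        exact le_trans (List.length_dropWhile_le _ _) (Nat.le_of_succ_le_succ hlen)
      have hihd := ih _ hdlen
      have hdropshape : (l :: rest).dropWhile p = [] ∨
          ∃ x t, (l :: rest).dropWhile p = x :: t ∧ cul_key x = !cul_key l := by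
        cases hd : (l :: rest).dropWhile p with
        | nil => exact Or.inl rfl
        | cons x t =>
          refine Or.inr ⟨x, t, rfl, ?_⟩
          have := dropWhile_cons_false _ _ _ hd
          simp only [hp, beq_eq_false_iff_ne, ne_eq] at this
          cases hk : cul_key x <;> cases hkl : cul_key l <;> simp_all
      cases hk : cul_key l with
      | false =>
        rw [if_neg (by simp [hk])]
        have hfalse : ∀ x ∈ (l :: rest).takeWhile p, cul_key x = false :=
          fun x hx => by rw [hrunmem x hx, hk]
        conv_lhs => rw [← hsplit]
        rw [culA_loop_falseRun _ _ hfalse, hihd]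
      | true =>
        rw [if_pos (by simp [hk])]
        have htw : (l :: rest).takeWhile p = l :: rest.takeWhile p := by
          simp [hpl]
        have hl' : PySem.Str.startswith l "- " = true := hk
        conv_lhs => rw [← hsplit, htw]
        rw [List.cons_append]
        simp only [culA_loop]
        have htrue : ∀ x ∈ rest.takeWhile p, cul_key x = true := fun x hx => by
          rw [hrunmem x (by rw [htw]; exact List.mem_cons_of_mem _ hx), hk]
        rw [if_pos hl', culA_loop_acc, culA_loop_trueRun _ _ htrue]
        have hexit : culA_loop ((l :: rest).dropWhile p) [] true =
            "</ul>" :: culA_loop ((l :: rest).dropWhile p) [] false := by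
          apply culA_loop_exit
          rcases hdropshape with h | ⟨x, t, he, hx⟩
          · exact Or.inl h
          · exact Or.inr ⟨x, t, he, by rw [hx, hk]; rfl⟩
        rw [hexit, hihd]
        simp [htw, cul_item]

-- ===== VERDICT (by name: the statement is the Claim_ definition above) =====
theorem convert_unordered_list_spec : Claim_equal_convert_unordered_list := by
  intro lines _
  show convert_unordered_list lines = convert_unordered_list_alt lines
  exact culA_eq_alt lines.length lines le_rfl
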